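-- pv_equiv track=rewrite | github.com/Boyyey/Genetic-Circuit-AI | core/nlp_parser.py | _normalize_biological_terms
-- ===== SOURCE A (Python) =====
-- def _normalize_biological_terms(text: str) -> str:
--     """Normalize biological terms for consistent parsing."""
--     # Common abbreviations and variations
--     replacements = {
--         "gene a": "gene_a",
--         "gene b": "gene_b",
--         "sugar x": "sugar_x",
--         "stress y": "stress_y",
--         "protein": "protein",
--         "mrna": "mRNA",
--         "dna": "DNA",
--         "rna": "RNA"
--     }
--
--     for old, new in replacements.items():
--         text = text.replace(old, new)
--
--     return text
-- ===== SOURCE B (Python) =====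
-- import re
--
-- _REPLACEMENTS = {
--     "gene a": "gene_a",
--     "gene b": "gene_b",
--     "sugar x": "sugar_x",
--     "stress y": "stress_y",
--     "protein": "protein",
--     "mrna": "mRNA",
--     "dna": "DNA",
--     "rna": "RNA",
-- }
--
-- # One alternation in dict order: at each position the first listed key wins,
-- # which reproduces the pass order of the sequential replaces ("mrna" before "rna").
-- _PATTERN = re.compile("|".join(re.escape(k) for k in _REPLACEMENTS))
--
--
-- def _normalize_biological_terms(text: str) -> str:
--     """Normalize biological terms for consistent parsing."""
--     return _PATTERN.sub(lambda m: _REPLACEMENTS[m.group(0)], text)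
-- ===== Notes on version B (the rewrite author's own statement) =====
-- stated objective: idiomatic
-- what changed: Replaced eight sequential whole-string str.replace passes by one precompiled regex alternation (keys in dict order, so 'mrna' wins over 'rna') applied in a single left-to-right pass with a lookup-table substitution function.
import Mathlib
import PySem

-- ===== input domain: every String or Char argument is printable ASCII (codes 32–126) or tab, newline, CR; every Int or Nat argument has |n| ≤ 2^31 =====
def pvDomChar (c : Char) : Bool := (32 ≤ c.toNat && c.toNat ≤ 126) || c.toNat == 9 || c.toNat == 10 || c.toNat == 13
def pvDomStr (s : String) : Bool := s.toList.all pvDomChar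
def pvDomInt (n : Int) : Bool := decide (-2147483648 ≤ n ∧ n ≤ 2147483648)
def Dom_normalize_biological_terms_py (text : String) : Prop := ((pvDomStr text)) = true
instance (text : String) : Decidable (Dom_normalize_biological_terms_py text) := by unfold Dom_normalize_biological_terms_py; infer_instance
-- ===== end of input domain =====

-- B replaces A's eight sequential whole-string str.replace passes by one left-to-right scan
-- (a compiled regex alternation of the keys in dict order) with a lookup-table substitution.

-- ===== PORT A =====
def normalize_biological_terms_py (text : String) : String :=
  -- replacements dict in insertion order, then `for old, new in replacements.items(): text = text.replace(old, new)`
  let replacements : List (String × String) :=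
    [("gene a", "gene_a"), ("gene b", "gene_b"), ("sugar x", "sugar_x"), ("stress y", "stress_y"),
     ("protein", "protein"), ("mrna", "mRNA"), ("dna", "DNA"), ("rna", "RNA")]
  replacements.foldl (fun t p => PySem.Str.replace t p.1 p.2) text

-- ===== PORT B =====
-- the (key, replacement) table, keys in dict order = the order of the regex alternation
def pvKV : List (List Char × List Char) :=
  [("gene a".toList, "gene_a".toList), ("gene b".toList, "gene_b".toList),
   ("sugar x".toList, "sugar_x".toList), ("stress y".toList, "stress_y".toList),
   ("protein".toList, "protein".toList), ("mrna".toList, "mRNA".toList),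
   ("dna".toList, "DNA".toList), ("rna".toList, "RNA".toList)]

-- hand port of `_PATTERN.sub(lambda m: _REPLACEMENTS[m.group(0)], text)` for a literal
-- alternation: scan left to right; at each position the first alternative that matches is
-- replaced via the table and the scan resumes after it.  Exact for a regex that is an
-- alternation of escaped literals.
def pvScan (l : List Char) : List Char :=
  match l with
  | [] => []
  | c :: t =>
    match pvKV.find? (fun p => p.1.isPrefixOf (c :: t)) with
    | some (k, v) => v ++ pvScan (t.drop (k.length - 1))
    | none => c :: pvScan t
termination_by l.length
decreasing_by all_goals (simp [List.length_drop]; try omega)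

def normalize_biological_terms_py_alt (text : String) : String :=
  String.ofList (pvScan text.toList)

-- ===== PRECONDITION & SPEC =====
def Spec_normalize_biological_terms_py (text : String) (out : String) : Prop := out = normalize_biological_terms_py_alt text
instance (text : String) (out : String) : Decidable (Spec_normalize_biological_terms_py text out) := by unfold Spec_normalize_biological_terms_py; infer_instance

-- ===== CLAIM (what is proved, stated in full; the proofs are below) =====
def Claim_equal_normalize_biological_terms_py : Prop := ∀ (text : String), Dom_normalize_biological_terms_py text → Spec_normalize_biological_terms_py text (normalize_biological_terms_py text)

-- ===== LEMMAS AND PROOFS =====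

-- proof-side model of Python str.replace (old ≠ []) over List Char
def pvRepl (old new : List Char) (l : List Char) : List Char :=
  match l with
  | [] => []
  | c :: t =>
    if old.isPrefixOf (c :: t) then new ++ pvRepl old new (t.drop (old.length - 1))
    else c :: pvRepl old new t
termination_by l.length
decreasing_by all_goals (simp [List.length_drop]; try omega)

theorem pvRepl_nil (old new : List Char) : pvRepl old new [] = [] := by simp [pvRepl]

theorem pvRepl_neg (old new : List Char) (c : Char) (t : List Char) (h : ¬ old <+: (c :: t)) :
    pvRepl old new (c :: t) = c :: pvRepl old new t := by
  rw [pvRepl]; simp [List.isPrefixOf_iff_prefix, h]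

theorem pvRepl_pos (old new : List Char) (l : List Char) (h0 : old ≠ []) (h : old <+: l) :
    pvRepl old new l = new ++ pvRepl old new (l.drop old.length) := by
  match l with
  | [] =>
    exact absurd (List.prefix_nil.mp h) h0
  | c :: t =>
    rw [pvRepl]
    obtain ⟨n, hn⟩ : ∃ n, old.length = n + 1 := by
      cases old with | nil => exact absurd rfl h0 | cons a b => exact ⟨b.length, by simp⟩
    simp [List.isPrefixOf_iff_prefix, h, hn]

theorem pv_go_eq : ∀ (fuel : Nat) (l acc old new : List Char), old ≠ [] → l.length ≤ fuel →
    PySem.Chars.replace.go old new fuel l acc = acc.reverse ++ pvRepl old new l := by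
  intro fuel
  induction fuel with
  | zero =>
    intro l acc old new h hl
    have : l = [] := by cases l with | nil => rfl | cons a b => simp at hl
    subst this
    rw [PySem.Chars.replace.go]; simp [pvRepl_nil]
  | succ n ih =>
    intro l acc old new h hl
    cases l with
    | nil => rw [PySem.Chars.replace.go]; simp [pvRepl_nil]; omega
    | cons c t =>
      rw [PySem.Chars.replace.go]
      by_cases hp : old.isPrefixOf (c :: t)
      · simp only [hp, if_pos]
        have hpre : old <+: c :: t := List.isPrefixOf_iff_prefix.mp hp
        have h1 : old.length ≥ 1 := by cases old with | nil => exact absurd rfl h | cons a b => simp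
        have hlen : ((c :: t).drop old.length).length ≤ n := by
          simp only [List.length_drop]
          have := hpre.length_le
          simp at this hl ⊢
          omega
        rw [ih _ _ _ _ h hlen, pvRepl_pos old new (c :: t) h hpre]
        simp
      · simp only [hp, if_neg, Bool.not_eq_true]
        have hpre : ¬ old <+: c :: t := fun hh => hp (List.isPrefixOf_iff_prefix.mpr hh)
        have hlen : t.length ≤ n := by simp at hl; omega
        rw [ih _ _ _ _ h hlen, pvRepl_neg old new c t hpre]
        simp

theorem pv_replace_eq (l old new : List Char) (h : old ≠ []) :
    PySem.Chars.replace l old new = pvRepl old new l := by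
  rw [PySem.Chars.replace]
  have : old.isEmpty = false := by cases old with | nil => exact absurd rfl h | cons a b => rfl
  rw [this]
  simpa using pv_go_eq l.length l [] old new h le_rfl

-- a prefix of an append is a prefix of, or extends, the left part
theorem pv_prefix_append_or (k s Y : List Char) (h : k <+: s ++ Y) : k <+: s ∨ s <+: k := by
  induction s generalizing k with
  | nil => exact Or.inr (List.nil_prefix)
  | cons a s' ih =>
    cases k with
    | nil => exact Or.inl List.nil_prefix
    | cons b k' =>
      rw [List.cons_append, List.cons_prefix_cons] at h
      obtain ⟨rfl, h2⟩ := h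
      rcases ih k' h2 with h3 | h3
      · exact Or.inl (List.cons_prefix_cons.mpr ⟨rfl, h3⟩)
      · exact Or.inr (List.cons_prefix_cons.mpr ⟨rfl, h3⟩)

-- `blockedB u k`: no nonempty suffix of u is prefix-comparable with k, so a pattern k can
-- never match starting inside u, whatever follows u
def pvBlockedB (u k : List Char) : Bool :=
  u.tails.all (fun s => s.isEmpty || (!(k.isPrefixOf s) && !(s.isPrefixOf k)))

theorem pv_blocked_tail (a : Char) (u' k : List Char) (h : pvBlockedB (a :: u') k = true) :
    pvBlockedB u' k = true := by
  simp only [pvBlockedB, List.tails_cons, List.all_cons, Bool.and_eq_true] at h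
  exact h.2

theorem pv_blocked_not_prefix (a : Char) (u' k Y : List Char) (h : pvBlockedB (a :: u') k = true) :
    ¬ k <+: (a :: u') ++ Y := by
  intro hk
  have hs := (by
    simp only [pvBlockedB, List.tails_cons, List.all_cons, Bool.and_eq_true] at h
    exact h.1)
  rcases pv_prefix_append_or k (a :: u') Y hk with h1 | h1
  · simp [← List.isPrefixOf_iff_prefix] at h1; simp [h1] at hs
  · simp [← List.isPrefixOf_iff_prefix] at h1; simp [h1] at hs

-- a blocked pass walks straight over u
theorem pv_step_pass (k v u : List Char) (hb : pvBlockedB u k = true) :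
    ∀ Y, pvRepl k v (u ++ Y) = u ++ pvRepl k v Y := by
  induction u with
  | nil => intro Y; simp
  | cons a u' ih =>
    intro Y
    rw [List.cons_append, pvRepl_neg k v a (u' ++ Y) (pv_blocked_not_prefix a u' k Y hb)]
    rw [ih (pv_blocked_tail a u' k hb) Y, List.cons_append]

theorem pv_step_hit (k v : List Char) (hk : k ≠ []) (X : List Char) :
    pvRepl k v (k ++ X) = v ++ pvRepl k v X := by
  rw [pvRepl_pos k v (k ++ X) hk (List.prefix_append k X), List.drop_left]

-- the nonempty proper suffixes of the keys
def pvSuf : List (List Char) := pvKV.flatMap (fun p => p.1.tail.tails.filter (fun s => !s.isEmpty))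

-- finite character facts, all checked by kernel computation
theorem pvF_suf_ne_nil : ∀ s ∈ pvSuf, s ≠ [] := by decide
theorem pvF_suf_val : ∀ s ∈ pvSuf, ∀ p ∈ pvKV, ¬ (s.isPrefixOf p.2 || p.2.isPrefixOf s) = true := by decide
theorem pvF_suf_tail : ∀ s ∈ pvSuf, s.tail ≠ [] → s.tail ∈ pvSuf := by decide
theorem pvF_key : ∀ p ∈ pvKV, p.1 ≠ [] ∧ p.1.tail ≠ [] ∧ p.1.tail ∈ pvSuf := by decide

-- a replace pass never creates a fresh occurrence of a key suffix at the front
theorem pv_no_create : ∀ (l : List Char), ∀ s ∈ pvSuf, ∀ p ∈ pvKV,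
    ¬ s <+: l → ¬ s <+: pvRepl p.1 p.2 l := by
  intro l
  induction l with
  | nil =>
    intro s hs p hp _ hcon
    rw [pvRepl_nil] at hcon
    exact pvF_suf_ne_nil s hs (List.prefix_nil.mp hcon)
  | cons c t ih =>
    intro s hs p hp hnot hcon
    by_cases hpre : p.1 <+: c :: t
    · rw [pvRepl_pos p.1 p.2 (c :: t) (pvF_key p hp).1 hpre] at hcon
      rcases pv_prefix_append_or s p.2 _ hcon with h1 | h1
      · have := pvF_suf_val s hs p hp
        simp [← List.isPrefixOf_iff_prefix] at h1; simp [h1] at this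
      · have := pvF_suf_val s hs p hp
        simp [← List.isPrefixOf_iff_prefix] at h1; simp [h1] at this
    · rw [pvRepl_neg p.1 p.2 c t hpre] at hcon
      cases s with
      | nil => exact pvF_suf_ne_nil [] hs rfl
      | cons s0 s' =>
        rw [List.cons_prefix_cons] at hcon
        obtain ⟨rfl, hcon2⟩ := hcon
        cases s' with
        | nil => exact hnot (List.cons_prefix_cons.mpr ⟨rfl, List.nil_prefix⟩)
        | cons x y =>
          have hs' : (x :: y) ∈ pvSuf := pvF_suf_tail _ hs (by simp)
          have hnot' : ¬ (x :: y) <+: t := by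
            intro hh; exact hnot (List.cons_prefix_cons.mpr ⟨rfl, hh⟩)
          exact ih (x :: y) hs' p hp hnot' hcon2

-- the sequential composition of replace passes, as a fold
def pvChain (ps : List (List Char × List Char)) (l : List Char) : List Char :=
  ps.foldl (fun t p => pvRepl p.1 p.2 t) l

theorem pvChain_nil : ∀ ps, pvChain ps [] = [] := by
  intro ps
  induction ps with
  | nil => rfl
  | cons p ps' ih => simp [pvChain, List.foldl_cons, pvRepl_nil] at ih ⊢; exact ih

theorem pv_not_prefix_cons_repl (p q : List Char × List Char) (hp : p ∈ pvKV) (hq : q ∈ pvKV)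
    (c : Char) (t : List Char) (h : ¬ p.1 <+: c :: t) : ¬ p.1 <+: c :: pvRepl q.1 q.2 t := by
  intro hcon
  obtain ⟨hne, htne, hts⟩ := pvF_key p hp
  cases hk : p.1 with
  | nil => exact hne hk
  | cons c0 p' =>
    rw [hk] at hcon
    rw [List.cons_prefix_cons] at hcon
    obtain ⟨rfl, h2⟩ := hcon
    have hnot : ¬ p' <+: t := by
      intro hh; exact h (hk ▸ List.cons_prefix_cons.mpr ⟨rfl, hh⟩)
    have hs' : p' ∈ pvSuf := by have := hts; rw [hk] at this; exact this
    exact pv_no_create t p' hs' q hq hnot h2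

-- when no key matches at the front, every pass keeps the head character
theorem pv_chain_cons : ∀ (ps : List (List Char × List Char)), (∀ p ∈ ps, p ∈ pvKV) →
    ∀ (c : Char) (t : List Char), (∀ p ∈ ps, ¬ p.1 <+: c :: t) →
    pvChain ps (c :: t) = c :: pvChain ps t := by
  intro ps
  induction ps with
  | nil => intro _ c t _; rfl
  | cons p ps' ih =>
    intro hmem c t hnp
    have hp : p ∈ pvKV := hmem p (by simp)
    have h1 : pvRepl p.1 p.2 (c :: t) = c :: pvRepl p.1 p.2 t :=
      pvRepl_neg p.1 p.2 c t (hnp p (by simp))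
    have hmem' : ∀ q ∈ ps', q ∈ pvKV := fun q hq => hmem q (by simp [hq])
    have hnp' : ∀ q ∈ ps', ¬ q.1 <+: c :: pvRepl p.1 p.2 t := fun q hq =>
      pv_not_prefix_cons_repl q p (hmem' q hq) hp c t (hnp q (by simp [hq]))
    simp only [pvChain, List.foldl_cons] at ih ⊢
    rw [h1, ih hmem' c (pvRepl p.1 p.2 t) hnp']

-- every pass walks over a blocked concrete block u
theorem pv_chain_append : ∀ (ps : List (List Char × List Char)) (u : List Char),
    (∀ p ∈ ps, pvBlockedB u p.1 = true) →
    ∀ Y, pvChain ps (u ++ Y) = u ++ pvChain ps Y := by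
  intro ps
  induction ps with
  | nil => intro u _ Y; rfl
  | cons p ps' ih =>
    intro u hb Y
    simp only [pvChain, List.foldl_cons] at ih ⊢
    rw [pv_step_pass p.1 p.2 u (hb p (by simp)) Y, ih u (fun q hq => hb q (by simp [hq]))]

-- find? over a list decomposes it at the first hit
theorem pv_find?_split {α : Type} (p : α → Bool) : ∀ (l : List α) (a : α), l.find? p = some a →
    p a = true ∧ ∃ bef aft, bef ++ a :: aft = l ∧ ∀ x ∈ bef, p x = false := by
  intro l
  induction l with
  | nil => intro a h; simp at h
  | cons x xs ih =>
    intro a h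
    by_cases hx : p x
    · rw [List.find?_cons_of_pos hx] at h
      obtain rfl : x = a := by injection h
      exact ⟨hx, [], xs, rfl, by simp⟩
    · rw [List.find?_cons_of_neg (by simpa using hx)] at h
      obtain ⟨h1, bef, aft, h2, h3⟩ := ih a h
      exact ⟨h1, x :: bef, aft, by simp [h2], by
        intro y hy
        rcases List.mem_cons.mp hy with rfl | hy'
        · simpa using hx
        · exact h3 y hy'⟩

-- per-position blocking facts about the concrete table (kernel computation):
-- keys earlier in the table never match inside a later key, and no key matches inside any value
theorem pvF_split : ∀ i, ∀ h : i < pvKV.length,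
    (∀ p ∈ pvKV.take i, pvBlockedB ((pvKV[i]'h).1) p.1 = true) ∧
    (∀ p ∈ pvKV.drop (i + 1), pvBlockedB ((pvKV[i]'h).2) p.1 = true) := by decide

-- main lemma: the eight sequential passes equal the single left-to-right scan
theorem pv_main : ∀ (n : Nat) (l : List Char), l.length = n → pvChain pvKV l = pvScan l := by
  intro n
  induction n using Nat.strong_induction_on with
  | _ n ih =>
    intro l hn
    cases l with
    | nil => rw [pvChain_nil, pvScan]
    | cons c t =>
      cases hf : pvKV.find? (fun p => p.1.isPrefixOf (c :: t)) with
      | none =>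
        have hnone : ∀ p ∈ pvKV, ¬ p.1 <+: c :: t := by
          intro p hp hcon
          have := List.find?_eq_none.mp hf p hp
          simp [List.isPrefixOf_iff_prefix, hcon] at this
        rw [pvScan]
        simp only [hf]
        rw [pv_chain_cons pvKV (fun _ h => h) c t hnone]
        have : t.length < n := by simp at hn; omega
        rw [ih t.length this t rfl]
      | some kv =>
        obtain ⟨k, v⟩ := kv
        obtain ⟨hpk, bef, aft, hsplit, hbef⟩ := pv_find?_split _ pvKV (k, v) hf
        have hkpre : k <+: c :: t := List.isPrefixOf_iff_prefix.mp hpk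
        obtain ⟨rest, hrest⟩ := hkpre
        have hkvmem : (k, v) ∈ pvKV := by rw [← hsplit]; simp
        have hkne : k ≠ [] := (pvF_key (k, v) hkvmem).1
        -- identify the split with indices to read off the blocking facts
        have hlen : bef.length < pvKV.length := by
          have := congrArg List.length hsplit; simp at this; omega
        have hbefeq : pvKV.take bef.length = bef := by
          rw [← hsplit, List.take_left]
        have hafteq : pvKV.drop (bef.length + 1) = aft := by
          rw [← hsplit, show bef ++ (k, v) :: aft = (bef ++ [(k, v)]) ++ aft by simp,
              List.drop_left' (by simp)]
        have hidx : pvKV[bef.length]'hlen = (k, v) := by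
          have h2 : pvKV[bef.length]? = some (k, v) := by
            rw [← hsplit, List.getElem?_append_right (le_refl _)]
            simp
          rw [List.getElem?_eq_getElem hlen] at h2
          exact Option.some.inj h2
        obtain ⟨hb1, hb2⟩ := pvF_split bef.length hlen
        rw [hidx] at hb1 hb2
        rw [hbefeq] at hb1
        rw [hafteq] at hb2
        -- compute the chain side
        have hchain : pvChain pvKV (c :: t) = v ++ pvChain pvKV rest := by
          rw [← hsplit, ← hrest]
          show pvChain (bef ++ (k, v) :: aft) (k ++ rest) = v ++ pvChain (bef ++ (k, v) :: aft) rest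
          simp only [pvChain, List.foldl_append, List.foldl_cons]
          have e1 : List.foldl (fun t p => pvRepl p.1 p.2 t) (k ++ rest) bef
              = k ++ List.foldl (fun t p => pvRepl p.1 p.2 t) rest bef :=
            pv_chain_append bef k hb1 rest
          rw [e1, pv_step_hit k v hkne]
          exact pv_chain_append aft v hb2 _
        rw [hchain]
        -- compute the scan side
        rw [pvScan]
        simp only [hf]
        have hdrop : t.drop (k.length - 1) = rest := by
          cases k with
          | nil => exact absurd rfl hkne
          | cons k0 k' =>
            have : k0 :: (k' ++ rest) = c :: t := by simpa using hrest
            injection this with h1 h2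
            simp [← h2]
        rw [hdrop]
        have hrl : rest.length < n := by
          have := congrArg List.length hrest
          simp at this hn
          cases k with
          | nil => exact absurd rfl hkne
          | cons k0 k' => simp at this; omega
        rw [ih rest.length hrl rest rfl]

-- bridge: port A computes the chain on the character list
theorem pv_portA (text : String) :
    (normalize_biological_terms_py text).toList = pvChain pvKV text.toList := by
  simp only [normalize_biological_terms_py, pvChain, pvKV, List.foldl_cons, List.foldl_nil,
    PySem.Str.toList_replace]
  rw [pv_replace_eq _ _ _ (by decide), pv_replace_eq _ _ _ (by decide),
      pv_replace_eq _ _ _ (by decide), pv_replace_eq _ _ _ (by decide),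
      pv_replace_eq _ _ _ (by decide), pv_replace_eq _ _ _ (by decide),
      pv_replace_eq _ _ _ (by decide), pv_replace_eq _ _ _ (by decide)]

-- ===== VERDICT (by name: the statement is the Claim_ definition above) =====
theorem normalize_biological_terms_py_spec : Claim_equal_normalize_biological_terms_py := by
  intro text _
  show normalize_biological_terms_py text = normalize_biological_terms_py_alt text
  apply String.ext
  rw [pv_portA, pv_main (text.toList.length) text.toList rfl]
  simp [normalize_biological_terms_py_alt]
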